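-- pv_equiv track=rewrite | github.com/utarsuno/quasar_source | z_code_archive/project_euler_problems/problems/problem_020.py | factorial_digit_sum
-- ===== SOURCE A (Python) =====
-- def factorial_digit_sum(n):
-- 	local_sum = 1
-- 	i = 1
-- 	while i < n + 1:
-- 		local_sum *= i
-- 		i += 1
-- 	actual_sum = 0
-- 	for c in str(local_sum):
-- 		actual_sum += int(c)
-- 	return actual_sum
-- ===== SOURCE B (Python) =====
-- def factorial_digit_sum(n):
--     f = 1
--     for k in range(2, n + 1):
--         f *= k
--     total = 0
--     while f > 0:
--         f, r = divmod(f, 1000000000)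
--         while r > 0:
--             total += r % 10
--             r //= 10
--     return total
-- ===== Notes on version B (the rewrite author's own statement) =====
-- stated objective: alternative
-- what changed: B sums the digits of the factorial arithmetically, peeling nine-digit chunks off the big integer with divmod and extracting the decimal digits of each small chunk by repeated modulo/floor-division, instead of converting the whole factorial to a string and summing int(c) over its characters; the product loop also starts at two, skipping the unit factor.
import Mathlib
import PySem

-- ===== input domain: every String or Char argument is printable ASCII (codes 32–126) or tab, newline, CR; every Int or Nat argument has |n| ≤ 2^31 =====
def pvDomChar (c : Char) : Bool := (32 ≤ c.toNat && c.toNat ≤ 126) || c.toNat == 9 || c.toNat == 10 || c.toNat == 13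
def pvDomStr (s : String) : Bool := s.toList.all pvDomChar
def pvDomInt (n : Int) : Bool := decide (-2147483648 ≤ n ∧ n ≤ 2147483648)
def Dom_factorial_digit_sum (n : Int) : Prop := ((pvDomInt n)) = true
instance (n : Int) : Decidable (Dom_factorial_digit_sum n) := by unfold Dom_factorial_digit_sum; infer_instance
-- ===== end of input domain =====

-- B replaces A's string-based digit sum of n! by arithmetic digit extraction (divmod chunks, then
-- modulo/floor-division per digit); alternative decomposition, comparable cost.

-- ===== PORT A =====
-- A's 'while i < n + 1' counting loop is the fold over range(1, n+1); 'int(c)' on one character of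
-- str(local_sum) is PySem.Int.ofChars? [c] (never none here: local_sum ≥ 1, so only digit chars occur).
def factorial_digit_sum (n : Int) : Int :=
  let local_sum := (PySem.List.pyRange 1 (n + 1)).foldl (fun acc i => acc * i) 1
  (PySem.Int.toChars local_sum).foldl (fun acc c => acc + (PySem.Int.ofChars? [c]).getD 0) 0

-- ===== PORT B =====
-- the inner 'while r > 0: total += r % 10; r //= 10' loop of Source B, tail-recursively
def pvDigitLoop (total : Int) (m : Int) : Int :=
  if _h : 0 < m then pvDigitLoop (total + PySem.Int.mod m 10) (PySem.Int.floordiv m 10) else total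
termination_by m.toNat
decreasing_by
  have h1 : PySem.Int.floordiv m 10 = m / 10 := PySem.Int.floordiv_eq_ediv_of_pos (by omega)
  rw [h1]; omega

-- the outer 'while f > 0: f, r = divmod(f, 1000000000); <inner loop>' of Source B;
-- divmod with the nonzero constant is exactly floordiv / mod
def pvChunkLoop (total : Int) (f : Int) : Int :=
  if _h : 0 < f then
    pvChunkLoop (pvDigitLoop total (PySem.Int.mod f 1000000000)) (PySem.Int.floordiv f 1000000000)
  else total
termination_by f.toNat
decreasing_by
  have h1 : PySem.Int.floordiv f 1000000000 = f / 1000000000 :=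
    PySem.Int.floordiv_eq_ediv_of_pos (by omega)
  rw [h1]; omega

def factorial_digit_sum_alt (n : Int) : Int :=
  let f := (PySem.List.pyRange 2 (n + 1)).foldl (fun acc k => acc * k) 1
  pvChunkLoop 0 f

-- ===== PRECONDITION & SPEC =====
def Spec_factorial_digit_sum (n : Int) (out : Int) : Prop := out = factorial_digit_sum_alt n
instance (n : Int) (out : Int) : Decidable (Spec_factorial_digit_sum n out) := by unfold Spec_factorial_digit_sum; infer_instance

-- ===== CLAIM (what is proved, stated in full; the proofs are below) =====
def Claim_equal_factorial_digit_sum : Prop := ∀ (n : Int), Dom_factorial_digit_sum n → Spec_factorial_digit_sum n (factorial_digit_sum n)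

-- ===== LEMMAS AND PROOFS =====

-- mathematical digit sum, proof-side reference
def pvSumdig (k : Nat) : Nat :=
  if h : k = 0 then 0 else k % 10 + pvSumdig (k / 10)
termination_by k
decreasing_by exact Nat.div_lt_self (Nat.pos_of_ne_zero h) (by norm_num)

lemma pvSumdig_zero : pvSumdig 0 = 0 := by rw [pvSumdig]; simp

lemma pvSumdig_pos {k : Nat} (hk : k ≠ 0) : pvSumdig k = k % 10 + pvSumdig (k / 10) := by
  rw [pvSumdig, dif_neg hk]

lemma pv_digitChar_val {d : Nat} (hd : d < 10) :
    (PySem.Int.ofChars? [Nat.digitChar d]).getD 0 = (d : Int) := by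
  interval_cases d <;> decide

lemma pv_toDigitsCore_sum (f : Nat) : ∀ (k : Nat) (l : List Char), k < f →
    ((Nat.toDigitsCore 10 f k l).map (fun c => (PySem.Int.ofChars? [c]).getD 0)).sum
      = (pvSumdig k : Int) + ((l.map (fun c => (PySem.Int.ofChars? [c]).getD 0)).sum) := by
  induction f with
  | zero => intro k l h; omega
  | succ f ih =>
    intro k l hk
    simp only [Nat.toDigitsCore]
    by_cases h0 : k / 10 = 0
    · rw [if_pos h0]
      by_cases hz : k = 0
      · subst hz; simp [pvSumdig_zero, pv_digitChar_val (show 0 % 10 < 10 by norm_num)]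
      · rw [pvSumdig_pos hz, h0, pvSumdig_zero]
        simp [pv_digitChar_val (Nat.mod_lt k (by norm_num))]
    · rw [if_neg h0]
      have hkpos : 0 < k := by
        rcases Nat.eq_zero_or_pos k with h | h
        · exfalso; apply h0; simp [h]
        · exact h
      have hlt : k / 10 < f := by
        have := Nat.div_lt_self hkpos (show 1 < 10 by norm_num)
        omega
      rw [ih (k / 10) _ hlt]
      rw [pvSumdig_pos (by omega : k ≠ 0)]
      simp [pv_digitChar_val (Nat.mod_lt k (by norm_num))]
      ring

lemma pv_toChars_sum {m : Int} (hm : 1 ≤ m) :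
    ((PySem.Int.toChars m).map (fun c => (PySem.Int.ofChars? [c]).getD 0)).sum
      = (pvSumdig m.toNat : Int) := by
  unfold PySem.Int.toChars
  rw [if_neg (by omega)]
  unfold Nat.toDigits
  rw [pv_toDigitsCore_sum (m.toNat + 1) m.toNat [] (by omega)]
  simp

lemma pv_digitLoop_eq (k : Nat) : ∀ total : Int, pvDigitLoop total (k : Int) = total + (pvSumdig k : Int) := by
  induction k using Nat.strong_induction_on with
  | _ k ih =>
    intro total
    rw [pvDigitLoop]
    by_cases hz : k = 0
    · subst hz; rw [dif_neg (by omega)]; simp [pvSumdig_zero]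
    · rw [dif_pos (by omega : (0:Int) < (k:Int))]
      have hm : PySem.Int.mod (k : Int) 10 = ((k % 10 : Nat) : Int) := by
        exact_mod_cast PySem.Int.mod_natCast k 10
      have hd : PySem.Int.floordiv (k : Int) 10 = ((k / 10 : Nat) : Int) := by
        exact_mod_cast PySem.Int.floordiv_natCast k 10
      rw [hm, hd]
      rw [ih (k / 10) (Nat.div_lt_self (Nat.pos_of_ne_zero hz) (by norm_num))]
      rw [pvSumdig_pos hz]
      push_cast
      ring

lemma pv_sumdig_split (e : Nat) : ∀ k : Nat, pvSumdig k = pvSumdig (k % 10 ^ e) + pvSumdig (k / 10 ^ e) := by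
  induction e with
  | zero =>
    intro k
    have h1 : k % 1 = 0 := Nat.mod_one k
    simp [h1, pvSumdig_zero]
  | succ e ih =>
    intro k
    have hmod : k % 10 ^ (e + 1) % 10 = k % 10 :=
      Nat.mod_mod_of_dvd k (dvd_pow_self 10 (Nat.succ_ne_zero e))
    have hdiv : k % 10 ^ (e + 1) / 10 = (k / 10) % 10 ^ e := by
      have hp : (10 : Nat) ^ (e + 1) = 10 * 10 ^ e := by ring
      rw [hp]
      exact Nat.mod_mul_right_div_self k 10 (10 ^ e)
    have hdd : k / 10 ^ (e + 1) = (k / 10) / 10 ^ e := by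
      rw [Nat.div_div_eq_div_mul]
      ring_nf
    have hm : pvSumdig (k % 10 ^ (e + 1)) = k % 10 + pvSumdig ((k / 10) % 10 ^ e) := by
      by_cases h0 : k % 10 ^ (e + 1) = 0
      · have h1 : k % 10 = 0 := by rw [← hmod, h0]
        have h2 : (k / 10) % 10 ^ e = 0 := by rw [← hdiv, h0]
        rw [h0, h1, h2, pvSumdig_zero]
      · rw [pvSumdig_pos h0, hmod, hdiv]
    by_cases hk : k = 0
    · simp [hk, pvSumdig_zero]
    · rw [pvSumdig_pos hk, hm, hdd, ih (k / 10)]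
      omega

lemma pv_chunkLoop_eq (k : Nat) : ∀ total : Int, pvChunkLoop total (k : Int) = total + (pvSumdig k : Int) := by
  induction k using Nat.strong_induction_on with
  | _ k ih =>
    intro total
    rw [pvChunkLoop]
    by_cases hz : k = 0
    · subst hz; rw [dif_neg (by omega)]; simp [pvSumdig_zero]
    · rw [dif_pos (by omega : (0 : Int) < (k : Int))]
      have hm : PySem.Int.mod (k : Int) 1000000000 = ((k % 1000000000 : Nat) : Int) := by
        exact_mod_cast PySem.Int.mod_natCast k 1000000000
      have hd : PySem.Int.floordiv (k : Int) 1000000000 = ((k / 1000000000 : Nat) : Int) := by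
        exact_mod_cast PySem.Int.floordiv_natCast k 1000000000
      rw [hm, hd, pv_digitLoop_eq (k % 1000000000)]
      rw [ih (k / 1000000000) (Nat.div_lt_self (Nat.pos_of_ne_zero hz) (by norm_num))]
      have hsplit := pv_sumdig_split 9 k
      have hp : (10 : Nat) ^ 9 = 1000000000 := by norm_num
      rw [hp] at hsplit
      rw [hsplit]
      push_cast
      ring

lemma pv_foldl_mul_pos : ∀ (l : List Int), (∀ x ∈ l, 0 < x) → ∀ a : Int, 0 < a →
    0 < l.foldl (fun acc i => acc * i) a := by
  intro l
  induction l with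
  | nil => intro _ a ha; simpa
  | cons x t ih =>
    intro h a ha
    simp only [List.foldl]
    exact ih (fun y hy => h y (List.mem_cons_of_mem _ hy)) _
      (mul_pos ha (h x List.mem_cons_self))

lemma pv_fact_eq (n : Int) :
    (PySem.List.pyRange 1 (n + 1)).foldl (fun acc i => acc * i) 1
      = (PySem.List.pyRange 2 (n + 1)).foldl (fun acc i => acc * i) 1 := by
  by_cases h : (1 : Int) < n + 1
  · rw [PySem.List.pyRange_one_cons h]
    simp
  · have h1 : PySem.List.pyRange 1 (n + 1) = [] := by
      apply List.eq_nil_iff_forall_not_mem.mpr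
      intro x hx
      rw [PySem.List.mem_pyRange_one] at hx
      omega
    have h2 : PySem.List.pyRange 2 (n + 1) = [] := by
      apply List.eq_nil_iff_forall_not_mem.mpr
      intro x hx
      rw [PySem.List.mem_pyRange_one] at hx
      omega
    rw [h1, h2]

-- ===== VERDICT (by name: the statement is the Claim_ definition above) =====
theorem factorial_digit_sum_spec : Claim_equal_factorial_digit_sum := by
  intro n _
  unfold Spec_factorial_digit_sum factorial_digit_sum factorial_digit_sum_alt
  simp only []
  rw [pv_fact_eq n]
  set F := (PySem.List.pyRange 2 (n + 1)).foldl (fun acc k => acc * k) 1 with hF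
  have hFpos : 0 < F := by
    apply pv_foldl_mul_pos
    · intro x hx
      rw [PySem.List.mem_pyRange_one] at hx
      omega
    · norm_num
  rw [PySem.List.foldl_add (PySem.Int.toChars F) (fun c => (PySem.Int.ofChars? [c]).getD 0) 0]
  obtain ⟨K, hK⟩ : ∃ K : Nat, F = (K : Int) := ⟨F.toNat, by omega⟩
  rw [hK]
  rw [pv_toChars_sum (by omega : 1 ≤ ((K : Nat) : Int))]
  rw [pv_chunkLoop_eq K 0]
  simp
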